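-- pv_equiv track=rewrite | github.com/gauravjot/compression-algorithms | python/lzma/clzma.py | convertIntToCustom
-- ===== SOURCE A (Python) =====
-- from typing import Tuple, Dict
--
-- custom_numbering_i_g: Dict[int, str] = {
--     0: "α",
--     1: "β",
--     2: "γ",
--     3: "δ",
--     4: "ε",
--     5: "ζ",
--     6: "η",
--     7: "θ",
--     8: "ι",
--     9: "κ"
-- }
--
-- def convertIntToCustom(number: int) -> str:
--     result: str = ""
--     if number == 0:
--         return "α"
--     while number > 0:
--         result = custom_numbering_i_g[number % 10] + result
--         number = number // 10
--     return result
-- ===== SOURCE B (Python) =====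
-- GREEK_OF_DIGIT = {
--     "0": "α",
--     "1": "β",
--     "2": "γ",
--     "3": "δ",
--     "4": "ε",
--     "5": "ζ",
--     "6": "η",
--     "7": "θ",
--     "8": "ι",
--     "9": "κ"
-- }
--
-- def convertIntToCustom(number: int) -> str:
--     if number < 0:
--         return ""
--     return "".join(GREEK_OF_DIGIT[c] for c in str(number))
-- ===== Notes on version B (the rewrite author's own statement) =====
-- stated objective: idiomatic
-- what changed: B converts the integer once with str() and maps each decimal digit character to its Greek letter left-to-right with ''.join over a char->letter dict, instead of A's arithmetic mod/div while-loop that prepends letters right-to-left (negative numbers yield '' in both).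
import Mathlib
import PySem

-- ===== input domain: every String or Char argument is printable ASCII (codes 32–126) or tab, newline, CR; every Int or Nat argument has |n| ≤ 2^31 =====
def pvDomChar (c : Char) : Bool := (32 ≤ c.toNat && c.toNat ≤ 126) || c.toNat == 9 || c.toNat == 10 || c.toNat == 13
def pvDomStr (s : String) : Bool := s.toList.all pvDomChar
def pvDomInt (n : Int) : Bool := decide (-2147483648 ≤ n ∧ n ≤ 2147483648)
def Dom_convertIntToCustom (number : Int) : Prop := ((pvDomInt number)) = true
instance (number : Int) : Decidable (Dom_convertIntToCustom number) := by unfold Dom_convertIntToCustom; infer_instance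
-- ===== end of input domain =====

-- B maps the digits of str(number) to Greek letters with ''.join instead of A's mod/div while loop (idiomatic; same cost).

-- ===== PORT A =====
def customNumberingIG : PySem.Dict Int String :=
  PySem.Dict.ofList [((0 : Int), "α"), (1, "β"), (2, "γ"), (3, "δ"), (4, "ε"),
    (5, "ζ"), (6, "η"), (7, "θ"), (8, "ι"), (9, "κ")]

-- the 'while number > 0' loop; the dict key number % 10 is always present (0..9), so .getD "" never fires
def convertLoop (number : Int) (result : String) : String :=
  if _h : 0 < number then
    convertLoop (PySem.Int.floordiv number 10)
      ((customNumberingIG.get? (PySem.Int.mod number 10)).getD "" ++ result)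
  else result
termination_by number.toNat
decreasing_by
  simp only [PySem.Int.floordiv, Int.fdiv_eq_ediv]
  simp only [show ((0:Int) ≤ 10 ∨ (10:Int) ∣ number) = True from by simp, if_true]
  omega

def convertIntToCustom (number : Int) : String :=
  if number == 0 then "α" else convertLoop number ""

-- ===== PORT B =====
def greekOfDigitChar : PySem.Dict Char String :=
  PySem.Dict.ofList [('0', "α"), ('1', "β"), ('2', "γ"), ('3', "δ"), ('4', "ε"),
    ('5', "ζ"), ('6', "η"), ('7', "θ"), ('8', "ι"), ('9', "κ")]

def convertIntToCustom_alt (number : Int) : String :=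
  if number < 0 then ""
  else PySem.Str.join "" ((PySem.Int.toStr number).toList.map
    (fun c => (greekOfDigitChar.get? c).getD ""))

-- ===== PRECONDITION & SPEC =====
def Spec_convertIntToCustom (number : Int) (out : String) : Prop := out = convertIntToCustom_alt number
instance (number : Int) (out : String) : Decidable (Spec_convertIntToCustom number out) := by unfold Spec_convertIntToCustom; infer_instance

-- ===== CLAIM (what is proved, stated in full; the proofs are below) =====
def Claim_equal_convertIntToCustom : Prop := ∀ (number : Int), Dom_convertIntToCustom number → Spec_convertIntToCustom number (convertIntToCustom number)

-- ===== LEMMAS AND PROOFS =====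

-- reference digit list: decimal digit characters of k, most significant first
def myDigits (k : Nat) : List Char :=
  if _h : k < 10 then [Nat.digitChar k]
  else myDigits (k / 10) ++ [Nat.digitChar (k % 10)]
termination_by k
decreasing_by exact Nat.div_lt_self (by omega) (by norm_num)

lemma join_nil_flatten (l : List (List Char)) : PySem.Chars.join [] l = l.flatten := by
  induction l with
  | nil => rfl
  | cons x xs ih => simp [PySem.Chars.join] at *; cases xs <;> simp_all [List.intercalate]

-- B's per-string join, as a function of the digit characters
def joinGreek (cs : List Char) : String :=
  PySem.Str.join "" (cs.map (fun c => (greekOfDigitChar.get? c).getD ""))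

lemma toDigitsCore_eq (fuel : Nat) : ∀ (n : Nat) (acc : List Char), n < fuel →
    Nat.toDigitsCore 10 fuel n acc = myDigits n ++ acc := by
  induction fuel with
  | zero => intro n acc h; omega
  | succ f ih =>
    intro n acc h
    by_cases h10 : n / 10 = 0
    · have hn : n < 10 := by omega
      simp only [Nat.toDigitsCore, h10, if_true]
      rw [myDigits]
      simp [hn, Nat.mod_eq_of_lt hn]
    · have hge : 10 ≤ n := by omega
      simp only [Nat.toDigitsCore, h10, if_false]
      rw [ih (n / 10) _ (by omega)]
      conv_rhs => rw [myDigits]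
      simp [Nat.not_lt.mpr hge]

lemma toDigits_eq (n : Nat) : Nat.toDigits 10 n = myDigits n := by
  rw [Nat.toDigits, toDigitsCore_eq (n + 1) n [] (by omega), List.append_nil]

lemma joinGreek_append (xs ys : List Char) : joinGreek (xs ++ ys) = joinGreek xs ++ joinGreek ys := by
  apply String.ext
  simp [joinGreek, PySem.Str.toList_join, join_nil_flatten]

lemma joinGreek_single (c : Char) :
    joinGreek [c] = (greekOfDigitChar.get? c).getD "" := by
  apply String.ext
  simp [joinGreek, PySem.Str.toList_join]

lemma digit_lookup (d : Nat) (hd : d < 10) :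
    (customNumberingIG.get? (d : Int)).getD "" =
      (greekOfDigitChar.get? (Nat.digitChar d)).getD "" := by
  interval_cases d <;> decide

lemma floordiv_natCast (k : Nat) : PySem.Int.floordiv (k : Int) 10 = ((k / 10 : Nat) : Int) := by
  simp only [PySem.Int.floordiv, Int.fdiv_eq_ediv]
  simp only [show ((0:Int) ≤ 10 ∨ (10:Int) ∣ (k : Int)) = True from by simp, if_true]
  omega

lemma mod_natCast (k : Nat) : PySem.Int.mod (k : Int) 10 = ((k % 10 : Nat) : Int) := by
  have h : PySem.Int.mod (k : Int) 10 = (k : Int) % 10 := by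
    simp [PySem.Int.mod, Int.fmod_eq_emod]
  rw [h]; omega

lemma convertLoop_eq (fuel : Nat) : ∀ (k : Nat), k < fuel → 0 < k → ∀ (acc : String),
    convertLoop (k : Int) acc = joinGreek (myDigits k) ++ acc := by
  induction fuel with
  | zero => intro k h; omega
  | succ f ih =>
    intro k h hk acc
    rw [convertLoop]
    simp only [show (0 : Int) < (k : Int) from by exact_mod_cast hk, dif_pos,
      floordiv_natCast, mod_natCast]
    by_cases h10 : k < 10
    · have hdiv : k / 10 = 0 := by omega
      have hmod : k % 10 = k := Nat.mod_eq_of_lt h10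
      rw [hdiv, hmod, convertLoop]
      simp only [show ¬ (0:Int) < ((0:Nat) : Int) from by simp, dif_neg, not_false_iff]
      rw [myDigits]
      simp only [h10, dif_pos]
      rw [joinGreek_single, digit_lookup k h10]
    · have hdivpos : 0 < k / 10 := by omega
      rw [ih (k / 10) (by omega) hdivpos]
      rw [digit_lookup (k % 10) (by omega)]
      conv_rhs => rw [myDigits]
      simp only [h10, dif_neg, not_false_iff]
      rw [joinGreek_append, joinGreek_single, String.append_assoc]

lemma alt_pos (k : Nat) (hk : 0 < k) :
    convertIntToCustom_alt (k : Int) = joinGreek (myDigits k) := by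
  rw [convertIntToCustom_alt]
  simp only [show ¬ ((k : Int) < 0) from by omega, if_false]
  rw [show (PySem.Int.toStr (k : Int)).toList = PySem.Int.toChars (k : Int) from
    PySem.Int.toList_toStr _]
  have h : PySem.Int.toChars (k : Int) = Nat.toDigits 10 k := by
    simp [PySem.Int.toChars, show ¬ ((k : Int) < 0) from by omega]
  rw [h, toDigits_eq]
  rfl

-- ===== VERDICT (by name: the statement is the Claim_ definition above) =====
theorem convertIntToCustom_spec : Claim_equal_convertIntToCustom := by
  intro number _
  unfold Spec_convertIntToCustom
  rcases lt_trichotomy number 0 with hneg | hzero | hpos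
  · rw [convertIntToCustom, convertIntToCustom_alt]
    simp only [hneg, if_true, show (number == 0) = false from by simp; omega, Bool.false_eq_true,
      if_false]
    rw [convertLoop]
    simp [show ¬ (0 < number) from by omega]
  · subst hzero; decide
  · obtain ⟨k, rfl⟩ : ∃ k : Nat, number = (k : Int) := ⟨number.toNat, by omega⟩
    have hk : 0 < k := by exact_mod_cast hpos
    rw [convertIntToCustom]
    simp only [show ((k : Int) == 0) = false from by simp; omega, Bool.false_eq_true, if_false]
    rw [convertLoop_eq (k + 1) k (by omega) hk "", alt_pos k hk, String.append_empty]
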